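-- pv_equiv track=rewrite | github.com/tcl326/advent-of-code-2024 | linen_layout.py | part1
-- ===== SOURCE A (Python) =====
-- from typing import List
--
-- def part1(towels: List[str], designs: List[str]):
--     seen = {"": True}
--     def is_possible(design: str):
--         if design in seen:
--             return seen[design]
--         possible = False
--         for towel in towels:
--             if design[:len(towel)] == towel:
--                 future_possible = is_possible(design[len(towel):])
--                 possible = future_possible or possible
--             if possible:
--                 seen[design] = possible
--                 return True
--         seen[design] = False
--         return False
--
--     res = 0
--     for d in designs:
--         res += int(is_possible(d))
--     return res
-- ===== SOURCE B (Python) =====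
-- from typing import List
--
-- def part1(towels: List[str], designs: List[str]):
--     res = 0
--     for d in designs:
--         n = len(d)
--         dp = [False] * (n + 1)
--         dp[n] = True
--         for i in range(n - 1, -1, -1):
--             dp[i] = any(d[i:i+len(t)] == t and dp[i + len(t)] for t in towels)
--         res += int(dp[0])
--     return res
-- ===== Notes on version B (the rewrite author's own statement) =====
-- stated objective: alternative
-- what changed: Replaces the memoized top-down recursion (closure + shared dict cache across designs) by an explicit bottom-up boolean DP array swept from the end of each design; no recursion and no cross-design cache.
-- outside the precondition, e.g. on part1(['a', ''], ['a']): A returns 1, B returns 1; on part1([''], ['a']): A raises RecursionError, B returns 0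
import Mathlib
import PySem

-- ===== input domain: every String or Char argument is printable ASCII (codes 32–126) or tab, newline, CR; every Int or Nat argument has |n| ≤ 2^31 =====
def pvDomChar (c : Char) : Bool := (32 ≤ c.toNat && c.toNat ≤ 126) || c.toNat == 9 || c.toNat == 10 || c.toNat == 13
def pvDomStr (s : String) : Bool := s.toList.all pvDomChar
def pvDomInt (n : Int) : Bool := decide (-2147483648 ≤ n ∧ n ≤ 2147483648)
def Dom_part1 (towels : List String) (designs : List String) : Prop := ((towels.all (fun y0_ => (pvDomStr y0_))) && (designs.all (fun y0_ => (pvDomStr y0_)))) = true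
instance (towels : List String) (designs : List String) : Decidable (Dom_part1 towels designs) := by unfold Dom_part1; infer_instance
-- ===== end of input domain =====

-- B replaces A's memoized top-down recursion by a per-design bottom-up boolean DP sweep (objective: alternative).

-- ===== PORT A =====
-- seen : dict str→bool, keyed here by the design's character list (str keys, injectively).
-- Python's unbounded recursion is made total with a fuel parameter; under Pre_part1 every
-- recursive call strictly shortens the design, so fuel = len(design)+1 is never exhausted.
mutual
  -- is_possible(design), threading `seen`
  def ipA (towels : List String) (fuel : Nat) (design : List Char)
      (seen : PySem.Dict (List Char) Bool) : Bool × PySem.Dict (List Char) Bool :=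
    match fuel with
    | 0 => (false, seen)  -- fuel exhausted (unreachable under Pre_part1)
    | fuel + 1 =>
      match seen.get? design with
      | some b => (b, seen)
      | none => ipLoop towels fuel design false towels seen
  termination_by (fuel, 0)
  -- the `for towel in towels` loop, carrying `possible`
  def ipLoop (towels : List String) (fuel : Nat) (design : List Char) (possible : Bool)
      (ts : List String) (seen : PySem.Dict (List Char) Bool) : Bool × PySem.Dict (List Char) Bool :=
    match ts with
    | [] => (false, seen.insert design false)
    | t :: ts' =>
      let st :=
        if PySem.List.slice design none (some (t.toList.length : Int)) = t.toList then
          let r := ipA towels fuel (PySem.List.slice design (some (t.toList.length : Int)) none) seen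
          (r.1 || possible, r.2)
        else (possible, seen)
      if st.1 then (true, st.2.insert design true)
      else ipLoop towels fuel design st.1 ts' st.2
  termination_by (fuel, ts.length + 1)
end

def part1 (towels : List String) (designs : List String) : Int :=
  (designs.foldl
    (fun (acc : Int × PySem.Dict (List Char) Bool) d =>
      let r := ipA towels (d.toList.length + 1) d.toList acc.2
      (acc.1 + (if r.1 then 1 else 0), r.2))
    (0, PySem.Dict.empty.insert ([] : List Char) true)).1

-- ===== PORT B =====
-- dp value at position i: any towel t with d[i:i+len(t)] == t and dp[i+len(t)];
-- (false :: tail) models the in-progress array: dp[i] itself is still False when read.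
def dpStep (towels : List String) (cs : List Char) (tail : List Bool) : Bool :=
  towels.any (fun t => decide (cs.take t.toList.length = t.toList) && (false :: tail).getD t.toList.length false)

-- the i-loop from n-1 down to 0, built suffix-first; entry j = dp value of the suffix dropping j chars
def dpList (towels : List String) : List Char → List Bool
  | [] => [true]
  | c :: rest => dpStep towels (c :: rest) (dpList towels rest) :: dpList towels rest

def part1_alt (towels : List String) (designs : List String) : Int :=
  designs.foldl (fun acc d => acc + (if (dpList towels d.toList).headD false then 1 else 0)) 0

-- ===== PRECONDITION & SPEC =====
-- Pre_ excludes inputs where the empty towel occurs together with a nonempty design: there A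
-- can recurse without bound (RecursionError) — whether it does depends on towel order, so a
-- few such inputs on which A still returns are excluded too (see cites).
def Pre_part1 (towels : List String) (designs : List String) : Prop :=
  "" ∉ towels ∨ ∀ d ∈ designs, d = ""
instance (towels : List String) (designs : List String) : Decidable (Pre_part1 towels designs) := by
  unfold Pre_part1; infer_instance
def pvWitness_part1 : List String × List String := (["r", "g", "rb"], ["rg", "b", "rbg"])

def Spec_part1 (towels : List String) (designs : List String) (out : Int) : Prop := out = part1_alt towels designs
instance (towels : List String) (designs : List String) (out : Int) : Decidable (Spec_part1 towels designs out) := by unfold Spec_part1; infer_instance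

-- ===== CLAIM (what is proved, stated in full; the proofs are below) =====
def Claim_equal_part1 : Prop := ∀ (towels : List String) (designs : List String), Dom_part1 towels designs → Pre_part1 towels designs → Spec_part1 towels designs (part1 towels designs)

-- ===== LEMMAS AND PROOFS =====

-- dp value of a whole suffix
def dp0 (towels : List String) (cs : List Char) : Bool := (dpList towels cs).headD false

lemma dp0_nil (towels : List String) : dp0 towels [] = true := rfl

lemma dpList_getD (towels : List String) : ∀ (cs : List Char) (L : Nat), L ≤ cs.length →
    (dpList towels cs).getD L false = dp0 towels (cs.drop L) := by
  intro cs
  induction cs with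
  | nil =>
    intro L hL
    have hL0 : L = 0 := by simpa using hL
    subst hL0; rfl
  | cons c rest ih =>
    intro L hL
    cases L with
    | zero => rfl
    | succ L =>
      simp only [dpList, List.getD_cons_succ, List.drop_succ_cons]
      exact ih L (by simpa using hL)

-- the invariant on `seen`
def SeenInv (towels : List String) (seen : PySem.Dict (List Char) Bool) : Prop :=
  seen.get? [] = some true ∧ ∀ s b, seen.get? s = some b → b = dp0 towels s

lemma SeenInv_insert {towels : List String} {seen : PySem.Dict (List Char) Bool}
    (h : SeenInv towels seen) (s : List Char) (hs : s ≠ []) (b : Bool) (hb : b = dp0 towels s) :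
    SeenInv towels (seen.insert s b) := by
  constructor
  · rw [PySem.Dict.get?_insert]
    simp [Ne.symm hs, h.1]
  · intro s' b' h'
    rw [PySem.Dict.get?_insert] at h'
    by_cases hss : s' = s
    · simp [hss] at h'; subst h'; rw [hss]; exact hb
    · simp [hss] at h'; exact h.2 s' b' h'

lemma any_congr_mem {α : Type} (l : List α) (f g : α → Bool) (h : ∀ x ∈ l, f x = g x) :
    l.any f = l.any g := by
  induction l with
  | nil => rfl
  | cons x xs ih =>
    simp only [List.any_cons, h x (by simp)]
    rw [ih (fun y hy => h y (by simp [hy]))]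

-- pointwise agreement of the per-towel test with B's dpStep term, for a nonempty towel
lemma f_eq_step (towels : List String) (t : String) (ht : t ≠ "") (c : Char) (rest : List Char) :
    (decide ((c :: rest).take t.toList.length = t.toList)
      && dp0 towels ((c :: rest).drop t.toList.length))
    = (decide ((c :: rest).take t.toList.length = t.toList)
      && (false :: dpList towels rest).getD t.toList.length false) := by
  by_cases hm : (c :: rest).take t.toList.length = t.toList
  · have hLpos : 0 < t.toList.length := by
      rcases Nat.eq_zero_or_pos t.toList.length with h | h
      · exact absurd (by simpa using congrArg String.ofList (List.length_eq_zero_iff.mp h)) ht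
      · exact h
    have hLle : t.toList.length ≤ (c :: rest).length := by
      have hlm := congrArg List.length hm
      rw [List.length_take] at hlm; omega
    obtain ⟨L, hL⟩ : ∃ L, t.toList.length = L + 1 := ⟨t.toList.length - 1, by omega⟩
    rw [hL]
    simp only [List.getD_cons_succ, List.drop_succ_cons]
    rw [dpList_getD towels rest L (by rw [List.length_cons] at hLle; omega)]
  · have hd : decide ((c :: rest).take t.toList.length = t.toList) = false := by
      simpa using hm
    rw [hd, Bool.false_and, Bool.false_and]

-- dp0 on a nonempty design is the towel-wise any of the per-towel test
lemma dp0_cons (towels : List String) (h0 : "" ∉ towels) (c : Char) (rest : List Char) :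
    dp0 towels (c :: rest)
      = towels.any (fun t => decide ((c :: rest).take t.toList.length = t.toList)
          && dp0 towels ((c :: rest).drop t.toList.length)) := by
  show dpStep towels (c :: rest) (dpList towels rest) = _
  unfold dpStep
  exact any_congr_mem towels _ _ (fun t ht => (f_eq_step towels t
    (fun he => h0 (he ▸ ht)) c rest).symm)

-- the main correctness of A's recursion, by induction on fuel
lemma ipA_correct (towels : List String) (h0 : "" ∉ towels) : ∀ (fuel : Nat)
    (design : List Char) (seen : PySem.Dict (List Char) Bool),
    SeenInv towels seen → design.length < fuel →
    (ipA towels fuel design seen).1 = dp0 towels design ∧ SeenInv towels (ipA towels fuel design seen).2 := by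
  intro fuel
  induction fuel with
  | zero => intro design seen _ h; omega
  | succ fuel ih =>
    -- inner loop lemma, proved inline by induction on the remaining towel list
    have loop : ∀ (ts pre : List String) (design : List Char) (seen : PySem.Dict (List Char) Bool),
        towels = pre ++ ts →
        pre.any (fun t => decide (design.take t.toList.length = t.toList)
          && dp0 towels (design.drop t.toList.length)) = false →
        design ≠ [] → design.length ≤ fuel →
        SeenInv towels seen →
        (ipLoop towels fuel design false ts seen).1 = dp0 towels design ∧
        SeenInv towels (ipLoop towels fuel design false ts seen).2 := by
      intro ts
      induction ts with
      | nil =>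
        intro pre design seen htw hpre hne hlen hinv
        obtain ⟨c, rest, rfl⟩ : ∃ c rest, design = c :: rest := by
          cases design with
          | nil => exact absurd rfl hne
          | cons c rest => exact ⟨c, rest, rfl⟩
        have hdp : dp0 towels (c :: rest) = false := by
          rw [dp0_cons towels h0 c rest]
          have h1 := congrArg (fun l : List String => l.any
            (fun t => decide ((c :: rest).take t.toList.length = t.toList)
              && dp0 towels ((c :: rest).drop t.toList.length))) htw
          rw [List.append_nil] at h1
          exact h1.trans hpre
        refine ⟨?_, ?_⟩
        · simp [ipLoop, hdp]
        · simp only [ipLoop]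
          exact SeenInv_insert hinv _ hne false hdp.symm
      | cons t ts iht =>
        intro pre design seen htw hpre hne hlen hinv
        have htmem : t ∈ towels := by rw [htw]; simp
        have htne : t ≠ "" := fun he => h0 (he ▸ htmem)
        have hLpos : 0 < t.toList.length := by
          rcases Nat.eq_zero_or_pos t.toList.length with h | h
          · exact absurd (by simpa using congrArg String.ofList (List.length_eq_zero_iff.mp h)) htne
          · exact h
        rw [ipLoop]
        rw [PySem.List.slice_to_natCast, PySem.List.slice_from_natCast]
        by_cases hm : design.take t.toList.length = t.toList
        · -- prefix matches: recurse on the suffix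
          have hlt : (design.drop t.toList.length).length < fuel := by
            have hdn : design.length ≠ 0 := by simpa using hne
            rw [List.length_drop]; omega
          obtain ⟨hr1, hr2⟩ := ih (design.drop t.toList.length) seen hinv hlt
          simp only [hm, Bool.or_false]
          by_cases hb : (ipA towels fuel (design.drop t.toList.length) seen).1 = true
          · have hdp : dp0 towels design = true := by
              obtain ⟨c, rest, rfl⟩ : ∃ c rest, design = c :: rest := by
                cases design with
                | nil => exact absurd rfl hne
                | cons c rest => exact ⟨c, rest, rfl⟩
              rw [dp0_cons towels h0 c rest]
              refine List.any_eq_true.mpr ⟨t, htmem, ?_⟩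
              rw [← hr1, hb, hm]; simp
            simp only [hb]
            exact ⟨hdp.symm, SeenInv_insert hr2 _ hne true hdp.symm⟩
          · have hb' : (ipA towels fuel (design.drop t.toList.length) seen).1 = false :=
              Bool.not_eq_true _ |>.mp hb
            simp only [hb']
            refine iht (pre ++ [t]) design _ (by simp [htw]) ?_ hne hlen hr2
            rw [List.any_append, hpre, Bool.false_or]
            simp only [List.any_cons, List.any_nil, Bool.or_false]
            rw [hm]
            have hdt : decide (t.toList = t.toList) = true := by simp
            rw [hdt, Bool.true_and, ← hr1]
            exact hb'
        · -- no match: skip this towel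
          simp only [hm, Bool.false_eq_true, if_false]
          refine iht (pre ++ [t]) design seen (by simp [htw]) ?_ hne hlen hinv
          rw [List.any_append, hpre, Bool.false_or]
          simp only [List.any_cons, List.any_nil, Bool.or_false]
          have hdt : decide (design.take t.toList.length = t.toList) = false := by
            simpa using hm
          rw [hdt, Bool.false_and]
    intro design seen hinv hlen
    simp only [ipA]
    cases hg : seen.get? design with
    | some b =>
      exact ⟨hinv.2 design b hg, hinv⟩
    | none =>
      have hne : design ≠ [] := by
        intro he; rw [he, hinv.1] at hg; simp at hg
      exact loop towels [] design seen rfl rfl hne (by omega) hinv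

-- ===== VERDICT (by name: the statement is the Claim_ definition above) =====
theorem part1_spec : Claim_equal_part1 := by
  intro towels designs _ hpre
  unfold Spec_part1 part1 part1_alt
  have main : ∀ (ds : List String) (res : Int) (seen : PySem.Dict (List Char) Bool),
      SeenInv towels seen → ("" ∉ towels ∨ ∀ d ∈ ds, d = "") →
      (ds.foldl
        (fun (acc : Int × PySem.Dict (List Char) Bool) d =>
          let r := ipA towels (d.toList.length + 1) d.toList acc.2
          (acc.1 + (if r.1 then 1 else 0), r.2)) (res, seen)).1
      = ds.foldl (fun acc d => acc + (if (dpList towels d.toList).headD false then 1 else 0)) res := by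
    intro ds
    induction ds with
    | nil => intro res seen _ _; rfl
    | cons d ds ihd =>
      intro res seen hinv hpre
      simp only [List.foldl_cons]
      rcases hpre with h0 | hall
      · obtain ⟨h1, h2⟩ := ipA_correct towels h0 (d.toList.length + 1) d.toList seen hinv (by omega)
        rw [h1]
        exact ihd _ _ h2 (Or.inl h0)
      · have hd : d = "" := hall d (by simp)
        subst hd
        have h1 : ipA towels 1 [] seen = (true, seen) := by
          simp only [ipA, hinv.1]
        have h2 : (dpList towels ([] : List Char)).headD false = true := rfl
        simp only [String.toList_empty, List.length_nil, Nat.zero_add, h1, h2, if_pos]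
        exact ihd _ _ hinv (Or.inr (fun d hd => hall d (by simp [hd])))
  have hinv0 : SeenInv towels (PySem.Dict.empty.insert ([] : List Char) true) := by
    constructor
    · rw [PySem.Dict.get?_insert]; simp
    · intro s b h
      rw [PySem.Dict.get?_insert] at h
      by_cases hs : s = []
      · simp [hs] at h; subst h; simp [hs, dp0_nil]
      · simp [hs, PySem.Dict.get?_empty] at h
  exact main designs 0 _ hinv0 (hpre.imp id (fun h => h))
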